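-- pv_equiv track=rewrite | github.com/Tekkers75/BiopCode | BiopCod/BiopCod.py | rz_encoding
-- ===== SOURCE A (Python) =====
-- def rz_encoding(data):
--     encoded_data = []
--
--     consecutive_ones = 0
--
--     for bit in data:
--         if bit == 0:
--
--             encoded_data.append(0)
--
--         else:
--             if consecutive_ones % 2 == 0:
--                 encoded_data.append(1)
--             else:
--                 encoded_data.append(-1)
--
--
--             consecutive_ones += 1
--
--     return encoded_data
-- ===== SOURCE B (Python) =====
-- def rz_encoding(data):
--     xs = list(data)
--     result = [0] * len(xs)
--     ones = [i for i, bit in enumerate(xs) if bit != 0]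
--     for k, i in enumerate(ones):
--         result[i] = 1 if k % 2 == 0 else -1
--     return result
-- ===== Notes on version B (the rewrite author's own statement) =====
-- stated objective: alternative
-- what changed: Replaces A's single stateful scan (running parity counter while appending) with a two-pass plan: collect the indices of non-zero bits, then fill alternating +1/-1 at those indices into a zero-prefilled result array.
import Mathlib
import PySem

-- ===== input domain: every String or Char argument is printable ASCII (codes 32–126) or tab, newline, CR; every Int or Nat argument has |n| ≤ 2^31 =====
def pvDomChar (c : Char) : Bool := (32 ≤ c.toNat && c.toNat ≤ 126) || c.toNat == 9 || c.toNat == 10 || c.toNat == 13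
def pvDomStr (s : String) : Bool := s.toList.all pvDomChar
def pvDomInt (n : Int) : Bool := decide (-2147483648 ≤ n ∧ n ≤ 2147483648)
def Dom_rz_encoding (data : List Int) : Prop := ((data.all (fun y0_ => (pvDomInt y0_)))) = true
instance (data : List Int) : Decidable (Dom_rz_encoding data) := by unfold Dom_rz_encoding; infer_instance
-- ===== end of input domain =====

-- B computes the same RZ bipolar encoding by collecting the indices of non-zero bits first and then
-- filling alternating +1/-1 at those indices into a zero-prefilled result (alternative decomposition, same cost).

-- ===== PORT A =====
-- loop body of A's single scan: state = (encoded_data, consecutive_ones)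
def rzStep (st : List Int × Int) (bit : Int) : List Int × Int :=
  if bit == 0 then (st.1 ++ [0], st.2)
  else if PySem.Int.mod st.2 2 == 0 then (st.1 ++ [1], st.2 + 1)
  else (st.1 ++ [-1], st.2 + 1)

def rz_encoding (data : List Int) : List Int :=
  (data.foldl rzStep ([], 0)).1

-- ===== PORT B =====
-- port of Python's `enumerate`, starting at k
def pyEnumFrom {α : Type} (k : Nat) : List α → List (Nat × α)
  | [] => []
  | x :: t => (k, x) :: pyEnumFrom (k + 1) t

def rz_encoding_alt (data : List Int) : List Int :=
  let xs := data
  let result := List.replicate xs.length (0 : Int)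
  let ones := (pyEnumFrom 0 xs).filterMap (fun p => if p.2 ≠ 0 then some p.1 else none)
  (pyEnumFrom 0 ones).foldl
    (fun res p => res.set p.2 (if p.1 % 2 == 0 then (1 : Int) else -1)) result

-- ===== PRECONDITION & SPEC =====
def Spec_rz_encoding (data : List Int) (out : List Int) : Prop := out = rz_encoding_alt data
instance (data : List Int) (out : List Int) : Decidable (Spec_rz_encoding data out) := by unfold Spec_rz_encoding; infer_instance

-- ===== CLAIM (what is proved, stated in full; the proofs are below) =====
def Claim_equal_rz_encoding : Prop := ∀ (data : List Int), Dom_rz_encoding data → Spec_rz_encoding data (rz_encoding data)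

-- ===== LEMMAS AND PROOFS =====

-- reference recursion: the RZ encoding of xs when n ones were already seen
def rzSpec : List Int → Nat → List Int
  | [], _ => []
  | b :: t, n =>
      if b = 0 then 0 :: rzSpec t n
      else (if n % 2 = 0 then (1 : Int) else -1) :: rzSpec t (n + 1)

-- the non-zero positions of xs, enumerated from k (proof-side view of B's first pass)
def onesF (k : Nat) (xs : List Int) : List Nat :=
  (pyEnumFrom k xs).filterMap (fun p => if p.2 ≠ 0 then some p.1 else none)

-- proof-side view of B's second pass
def setFold (j : Nat) (is : List Nat) (res : List Int) : List Int :=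
  (pyEnumFrom j is).foldl
    (fun r p => r.set p.2 (if p.1 % 2 == 0 then (1 : Int) else -1)) res

theorem alt_eq (data : List Int) :
    rz_encoding_alt data = setFold 0 (onesF 0 data) (List.replicate data.length 0) := rfl

-- ---- A-side: the scan equals rzSpec ----

theorem rzStep_zero (acc : List Int) (c : Int) : rzStep (acc, c) 0 = (acc ++ [0], c) := by
  simp [rzStep]

theorem rzStep_ne (acc : List Int) (n : Nat) (b : Int) (hb : b ≠ 0) :
    rzStep (acc, (n : Int)) b
      = (acc ++ [if n % 2 = 0 then (1 : Int) else -1], ((n + 1 : Nat) : Int)) := by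
  rcases Nat.mod_two_eq_zero_or_one n with h | h <;>
    simp [rzStep, hb, h] <;> omega

theorem aLoop_eq (xs : List Int) : ∀ (acc : List Int) (n : Nat),
    (xs.foldl rzStep (acc, (n : Int))).1 = acc ++ rzSpec xs n := by
  induction xs with
  | nil => intro acc n; simp [rzSpec]
  | cons b t ih =>
    intro acc n
    rw [List.foldl_cons]
    by_cases hb : b = 0
    · rw [hb, rzStep_zero, ih]
      simp [rzSpec]
    · rw [rzStep_ne acc n b hb, ih]
      simp [rzSpec, hb]

-- ---- B-side: the two passes equal rzSpec ----

theorem onesF_cons (k : Nat) (b : Int) (t : List Int) :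
    onesF k (b :: t) = if b = 0 then onesF (k + 1) t else k :: onesF (k + 1) t := by
  by_cases hb : b = 0 <;> simp [onesF, pyEnumFrom, hb]

theorem onesF_shift (xs : List Int) : ∀ k, onesF (k + 1) xs = (onesF k xs).map (· + 1) := by
  induction xs with
  | nil => intro k; simp [onesF, pyEnumFrom]
  | cons b t ih =>
    intro k
    rw [onesF_cons, onesF_cons, ih (k + 1)]
    by_cases hb : b = 0 <;> simp [hb]

theorem setFold_cons (j : Nat) (i : Nat) (t : List Nat) (res : List Int) :
    setFold j (i :: t) res
      = setFold (j + 1) t (res.set i (if j % 2 == 0 then (1 : Int) else -1)) := rfl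

theorem setFold_shift (is : List Nat) : ∀ (j : Nat) (y : Int) (res : List Int),
    setFold j (is.map (· + 1)) (y :: res) = y :: setFold j is res := by
  induction is with
  | nil => intro j y res; rfl
  | cons i t ih =>
    intro j y res
    rw [List.map_cons, setFold_cons, setFold_cons]
    rw [show (y :: res).set (i + 1) (if j % 2 == 0 then (1 : Int) else -1)
          = y :: res.set i (if j % 2 == 0 then (1 : Int) else -1) from rfl]
    exact ih (j + 1) y _

theorem bFold_eq (xs : List Int) : ∀ (j : Nat),
    setFold j (onesF 0 xs) (List.replicate xs.length 0) = rzSpec xs j := by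
  induction xs with
  | nil => intro j; rfl
  | cons b t ih =>
    intro j
    rw [onesF_cons, onesF_shift t 0]
    by_cases hb : b = 0
    · rw [if_pos hb]
      show setFold j ((onesF 0 t).map (· + 1)) (0 :: List.replicate t.length 0) = rzSpec (b :: t) j
      rw [setFold_shift, ih j]
      simp [rzSpec, hb]
    · rw [if_neg hb]
      show setFold j (0 :: (onesF 0 t).map (· + 1)) (0 :: List.replicate t.length 0) = rzSpec (b :: t) j
      rw [setFold_cons]
      rw [show ((0 : Int) :: List.replicate t.length 0).set 0 (if j % 2 == 0 then (1 : Int) else -1)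
            = (if j % 2 == 0 then (1 : Int) else -1) :: List.replicate t.length 0 from rfl]
      rw [setFold_shift, ih (j + 1)]
      rcases Nat.mod_two_eq_zero_or_one j with h | h <;> simp [rzSpec, hb, h]

-- ===== VERDICT (by name: the statement is the Claim_ definition above) =====
theorem rz_encoding_spec : Claim_equal_rz_encoding := by
  intro data _
  show rz_encoding data = rz_encoding_alt data
  rw [alt_eq, bFold_eq data 0]
  have hA := aLoop_eq data [] 0
  simp only [Nat.cast_zero, List.nil_append] at hA
  exact hA
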